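-- pv_equiv track=rewrite | github.com/ThAlsay/AoC-2023 | Day-3/part2.py | getLeft
-- ===== SOURCE A (Python) =====
-- def getLeft(line, start):
--     number = 0
--     i = start - 1
--     while i >= 0:
--         if not line[i].isdigit():
--             break
--         number = number + int(line[i]) * 10 ** (start - i - 1)
--         i -= 1
--     return number
-- ===== SOURCE B (Python) =====
-- def getLeft(line, start):
--     # Phase 1: scan left to find the boundary of the digit run ending at start-1.
--     i = start - 1
--     while i >= 0 and line[i].isdigit():
--         i -= 1
--     # Phase 2: parse the digit run left-to-right (Horner), no exponentiation.
--     value = 0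
--     for c in line[i + 1:start]:
--         value = value * 10 + int(c)
--     return value
-- ===== Notes on version B (the rewrite author's own statement) =====
-- stated objective: simpler
-- what changed: A accumulates digit*10**(start-i-1) per step while scanning right-to-left; B first scans left only to find the boundary of the digit run and then parses the slice left-to-right with a single Horner fold (value = value*10 + digit), with no exponentiation.
import Mathlib
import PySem

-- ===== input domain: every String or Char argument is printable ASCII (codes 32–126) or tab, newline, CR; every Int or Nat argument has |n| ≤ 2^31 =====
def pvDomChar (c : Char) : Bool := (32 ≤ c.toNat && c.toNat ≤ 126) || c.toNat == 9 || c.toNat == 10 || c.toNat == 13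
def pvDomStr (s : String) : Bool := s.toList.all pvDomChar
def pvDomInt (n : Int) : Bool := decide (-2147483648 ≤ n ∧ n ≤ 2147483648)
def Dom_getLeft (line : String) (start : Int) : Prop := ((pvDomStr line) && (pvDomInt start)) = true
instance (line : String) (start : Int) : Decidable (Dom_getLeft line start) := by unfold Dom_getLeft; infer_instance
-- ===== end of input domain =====

-- B replaces A's right-to-left place-value accumulation (digit * 10**k per step) by a
-- two-phase decomposition: find the left boundary of the digit run, then one left-to-right
-- Horner fold over the slice; objective: simpler (no exponentiation). Return value only.

-- ===== PORT A =====
-- the while loop of A: state (number, i), i decreasing; pyGet? none = IndexError (outside Pre_)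
def getLeftGoA (cs : List Char) (start : Int) (number : Int) (i : Int) : Int :=
  if h : 0 ≤ i then
    match PySem.List.pyGet? cs i with
    | none => number   -- Python raises IndexError here; excluded by Pre_getLeft
    | some c =>
      if PySem.Chars.isdigit c = false then number
      else getLeftGoA cs start
            (number + (PySem.Int.ofChars? [c]).getD 0 * 10 ^ (start - i - 1).toNat) (i - 1)
  else number
termination_by (i + 1).toNat
decreasing_by omega

def getLeft (line : String) (start : Int) : Int :=
  getLeftGoA line.toList start 0 (start - 1)

-- ===== PORT B =====
-- phase 1 of B: the boundary scan `while i >= 0 and line[i].isdigit(): i -= 1`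
def findLeftB (cs : List Char) (i : Int) : Int :=
  if h : 0 ≤ i then
    match PySem.List.pyGet? cs i with
    | none => i   -- Python raises IndexError here; excluded by Pre_getLeft
    | some c => if PySem.Chars.isdigit c then findLeftB cs (i - 1) else i
  else i
termination_by (i + 1).toNat
decreasing_by omega

def getLeft_alt (line : String) (start : Int) : Int :=
  let i := findLeftB line.toList (start - 1)
  (PySem.List.slice line.toList (some (i + 1)) (some start)).foldl
    (fun value c => value * 10 + (PySem.Int.ofChars? [c]).getD 0) 0

-- ===== PRECONDITION & SPEC =====
-- A raises IndexError iff start - 1 ≥ len(line) and start - 1 ≥ 0; Pre_ excludes exactly that.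
def Pre_getLeft (line : String) (start : Int) : Prop := start ≤ PySem.Str.len line
instance (line : String) (start : Int) : Decidable (Pre_getLeft line start) := by
  unfold Pre_getLeft; infer_instance

def pvWitness_getLeft : String × Int := ("4*123", 4)

def Spec_getLeft (line : String) (start : Int) (out : Int) : Prop := out = getLeft_alt line start
instance (line : String) (start : Int) (out : Int) : Decidable (Spec_getLeft line start out) := by
  unfold Spec_getLeft; infer_instance

-- ===== CLAIM (what is proved, stated in full; the proofs are below) =====
def Claim_equal_getLeft : Prop := ∀ (line : String) (start : Int), Dom_getLeft line start → Pre_getLeft line start → Spec_getLeft line start (getLeft line start)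

-- ===== LEMMAS AND PROOFS =====

-- a slice with equal bounds is empty (any Int bound)
lemma slice_self {α : Type} (xs : List α) (a : Int) :
    PySem.List.slice xs (some a) (some a) = [] := by
  have h := PySem.List.length_slice xs a a
  exact List.eq_nil_of_length_eq_zero (by omega)

-- the boundary scan never moves right
lemma findLeftB_le (cs : List Char) (i : Int) : findLeftB cs i ≤ i := by
  induction i using findLeftB.induct cs with
  | case1 i h hg => rw [findLeftB, dif_pos h, hg]
  | case2 i h c hg hd ih => rw [findLeftB, dif_pos h, hg]; simp only [hd, if_pos]; omega
  | case3 i h c hg hd => rw [findLeftB, dif_pos h, hg]; simp [hd]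
  | case4 i h => rw [findLeftB, dif_neg h]

-- starting at or above -1, the scan stops at or above -1
lemma findLeftB_neg_one_le (cs : List Char) (i : Int) :
    -1 ≤ i → -1 ≤ findLeftB cs i := by
  induction i using findLeftB.induct cs with
  | case1 i h hg => intro _; rw [findLeftB, dif_pos h, hg]; omega
  | case2 i h c hg hd ih =>
    intro _; rw [findLeftB, dif_pos h, hg]; simp only [hd, if_pos]; exact ih (by omega)
  | case3 i h c hg hd => intro _; rw [findLeftB, dif_pos h, hg]; simp [hd]; omega
  | case4 i h => intro hi; rw [findLeftB, dif_neg h]; omega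

-- main invariant: A's loop from position i equals Horner of the digit slice, scaled
lemma goA_eq (cs : List Char) (start : Int) (hlen : start ≤ (cs.length : Int)) :
    ∀ (number i : Int), i < start →
      getLeftGoA cs start number i
        = number + (PySem.List.slice cs (some (findLeftB cs i + 1)) (some (i + 1))).foldl
            (fun value c => value * 10 + (PySem.Int.ofChars? [c]).getD 0) 0
            * 10 ^ (start - 1 - i).toNat := by
  intro number i
  induction number, i using getLeftGoA.induct cs start with
  | case1 number i h hg =>
    intro hlt
    exfalso
    rw [PySem.List.pyGet?_eq_none_iff] at hg
    exact hg (by unfold PySem.Raise.InRange; omega)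
  | case2 number i h c hg hd =>
    intro hlt
    rw [getLeftGoA, dif_pos h]
    simp only [hg]
    rw [if_pos hd, findLeftB, dif_pos h]
    simp only [hg]
    rw [if_neg (by simp [hd]), slice_self]
    simp
  | case3 number i h c hg hd ih =>
    intro hlt
    have hlen' : i < (cs.length : Int) := by omega
    have hc : c = cs[i.toNat] := by
      have hx := PySem.List.pyGet?_eq_some_getElem cs h hlen'
      rw [hg] at hx
      exact Option.some_inj.mp hx
    have hd' : PySem.Chars.isdigit c = true := by
      cases hx : PySem.Chars.isdigit c with
      | false => exact absurd hx hd
      | true => rfl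
    rw [getLeftGoA, dif_pos h]
    simp only [hg]
    rw [if_neg (by simp [hd'])]
    rw [findLeftB, dif_pos h]
    simp only [hg]
    rw [if_pos hd']
    rw [ih (by omega)]
    -- boundary facts
    have hj1 : findLeftB cs (i - 1) ≤ i - 1 := findLeftB_le cs (i - 1)
    have hj2 : -1 ≤ findLeftB cs (i - 1) := findLeftB_neg_one_le cs (i - 1) (by omega)
    set j := findLeftB cs (i - 1) with hjdef
    have ha : (0 : Int) ≤ j + 1 := by omega
    -- rewrite both slices as drop/take
    rw [show i - 1 + 1 = i by ring]
    rw [PySem.List.slice_toNat cs ha (by omega : (0:Int) ≤ i),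
        PySem.List.slice_toNat cs ha (by omega : (0:Int) ≤ i + 1)]
    have hA : (j + 1).toNat ≤ i.toNat := by omega
    have hm : (i + 1).toNat - (j + 1).toNat = (i.toNat - (j + 1).toNat) + 1 := by omega
    have hmlt : i.toNat - (j + 1).toNat < (cs.drop (j + 1).toNat).length := by
      rw [List.length_drop]; omega
    rw [hm, List.take_add_one, List.getElem?_eq_getElem hmlt]
    have hidx : (cs.drop (j + 1).toNat)[i.toNat - (j + 1).toNat] = cs[i.toNat] := by
      rw [List.getElem_drop]
      congr 1
      omega
    rw [hidx, ← hc]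
    simp only [Option.toList_some, List.foldl_append, List.foldl_cons, List.foldl_nil]
    have hpow : (start - 1 - (i - 1)).toNat = (start - i - 1).toNat + 1 := by omega
    have hpow2 : (start - 1 - i).toNat = (start - i - 1).toNat := by omega
    rw [hpow, hpow2, pow_succ]
    ring
  | case4 number i h =>
    intro hlt
    rw [getLeftGoA, dif_neg h, findLeftB, dif_neg h, slice_self]
    simp

-- ===== VERDICT (by name: the statement is the Claim_ definition above) =====
theorem getLeft_spec : Claim_equal_getLeft := by
  intro line start _ hpre
  unfold Spec_getLeft getLeft getLeft_alt
  have hlen : start ≤ (line.toList.length : Int) := by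
    simpa [PySem.Str.len_eq] using hpre
  rw [goA_eq line.toList start hlen 0 (start - 1) (by omega)]
  rw [show start - 1 + 1 = start by ring]
  simp
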